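-- pv_equiv track=rewrite | github.com/nenengpuspita/soc-monitor | soc_monitor.py | security_parse
-- ===== SOURCE A (Python) =====
-- def security_parse(lines):
--
-- 	summary = {
--
-- 	     "INFO" : 0,
-- 	     "WARN" : 0,
-- 	     "ERROR": 0,
-- 	     "BRUTEFORCE ATTEMPT" : 0
--
-- 	}
--
-- 	for each_lines in lines:
-- 		only_status = each_lines.split()[0]
--
-- 		if only_status in summary:
-- 			summary[only_status] += 1
--
-- 	return summary
-- ===== SOURCE B (Python) =====
-- # B: sort-then-scan — sort the first tokens, run-length scan adjacent runs into a
-- # frequency table, then project the four fixed keys (alternative algorithm, O(n log n)).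
-- def security_parse(lines):
--     tokens = sorted(line.split()[0] for line in lines)
--     counts = {}
--     cur = None
--     run = 0
--     for t in tokens:
--         if t == cur:
--             run += 1
--         else:
--             if cur is not None:
--                 counts[cur] = run
--             cur = t
--             run = 1
--     if cur is not None:
--         counts[cur] = run
--     return {k: counts.get(k, 0) for k in ("INFO", "WARN", "ERROR", "BRUTEFORCE ATTEMPT")}
-- ===== Notes on version B (the rewrite author's own statement) =====
-- stated objective: alternative
-- what changed: Instead of A's single pass incrementing a pre-seeded dict for recognised statuses, B sorts all first tokens, builds a frequency table by a run-length scan over adjacent equal tokens, and then projects the four fixed keys out of that table.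
import Mathlib
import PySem

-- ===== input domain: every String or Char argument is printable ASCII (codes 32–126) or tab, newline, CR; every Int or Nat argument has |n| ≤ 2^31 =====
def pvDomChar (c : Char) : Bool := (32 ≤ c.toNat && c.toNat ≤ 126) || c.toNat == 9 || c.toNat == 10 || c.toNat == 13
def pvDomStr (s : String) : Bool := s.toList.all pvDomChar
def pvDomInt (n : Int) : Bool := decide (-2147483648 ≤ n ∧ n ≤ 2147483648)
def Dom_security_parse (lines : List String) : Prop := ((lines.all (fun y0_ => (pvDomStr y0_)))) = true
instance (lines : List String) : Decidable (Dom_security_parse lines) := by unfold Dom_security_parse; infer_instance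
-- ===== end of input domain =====

-- B replaces A's selective in-loop dict increments by a sort of all first tokens followed by a
-- run-length scan building a frequency table, projected onto the four fixed keys.

-- ===== PORT A =====
-- A's loop body: take the first token (Python raises IndexError on a tokenless line — excluded by Pre_),
-- and increment its entry if it is one of the pre-seeded keys.
def securityLoopBody : PySem.Dict String Int → String → PySem.Dict String Int :=
  fun summary each_lines =>
    match PySem.List.pyGet? (PySem.Str.split₀ each_lines) 0 with
    | none => summary
    | some only_status =>
      if summary.contains only_status then
        summary.modify only_status 0 (· + 1)
      else summary

def security_parse (lines : List String) : List (String × Int) :=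
  (lines.foldl securityLoopBody
    (PySem.Dict.ofList [("INFO", 0), ("WARN", 0), ("ERROR", 0), ("BRUTEFORCE ATTEMPT", 0)])).items

-- ===== PORT B =====
-- state is (counts, cur, run); Python's `t == cur` with cur possibly None is `some t = cur`.
def securityStepB (s : PySem.Dict String Int × Option String × Int) (t : String) :
    PySem.Dict String Int × Option String × Int :=
  match s with
  | (counts, cur, run) =>
    if some t = cur then (counts, cur, run + 1)
    else
      match cur with
      | some c => (counts.insert c run, some t, 1)
      | none => (counts, some t, 1)

-- the trailing `if cur is not None: counts[cur] = run`
def securityFlushB (s : PySem.Dict String Int × Option String × Int) : PySem.Dict String Int :=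
  match s with
  | (counts, some c, run) => counts.insert c run
  | (counts, none, _) => counts

def security_parse_alt (lines : List String) : List (String × Int) :=
  let tokens := PySem.List.sorted (lines.map (fun line => (PySem.Str.split₀ line).headD "")) (fun x => x) false
  -- headD: Python raises on a tokenless line, excluded by Pre_
  let counts := securityFlushB (tokens.foldl securityStepB (PySem.Dict.empty, none, 0))
  ["INFO", "WARN", "ERROR", "BRUTEFORCE ATTEMPT"].map (fun k => (k, counts.getD k 0))

-- ===== PRECONDITION & SPEC =====
-- Pre_ excludes exactly the inputs containing a tokenless (empty/whitespace-only) line, on which both Pythons raise IndexError.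
def Pre_security_parse (lines : List String) : Prop :=
  ∀ l ∈ lines, PySem.Str.split₀ l ≠ []
instance (lines : List String) : Decidable (Pre_security_parse lines) := by unfold Pre_security_parse; infer_instance
def pvWitness_security_parse : List String := ["INFO boot ok", "ERROR disk", "BRUTEFORCE ATTEMPT root", "misc line"]

def Spec_security_parse (lines : List String) (out : List (String × Int)) : Prop := out = security_parse_alt lines
instance (lines : List String) (out : List (String × Int)) : Decidable (Spec_security_parse lines out) := by unfold Spec_security_parse; infer_instance

-- ===== CLAIM (what is proved, stated in full; the proofs are below) =====
def Claim_equal_security_parse : Prop := ∀ (lines : List String), Dom_security_parse lines → Pre_security_parse lines → Spec_security_parse lines (security_parse lines)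

-- ===== LEMMAS AND PROOFS =====

-- One loop step of A on the 4-key dict: each value gains 1 exactly when the token equals its key.
lemma securityA_step (t : String) (a b c e : Int) :
    (if (PySem.Dict.mk [("INFO", a), ("WARN", b), ("ERROR", c), ("BRUTEFORCE ATTEMPT", e)]).contains t
     then (PySem.Dict.mk [("INFO", a), ("WARN", b), ("ERROR", c), ("BRUTEFORCE ATTEMPT", e)]).modify t 0 (· + 1)
     else PySem.Dict.mk [("INFO", a), ("WARN", b), ("ERROR", c), ("BRUTEFORCE ATTEMPT", e)])
    = PySem.Dict.mk [("INFO", a + if t = "INFO" then 1 else 0),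
                     ("WARN", b + if t = "WARN" then 1 else 0),
                     ("ERROR", c + if t = "ERROR" then 1 else 0),
                     ("BRUTEFORCE ATTEMPT", e + if t = "BRUTEFORCE ATTEMPT" then 1 else 0)] := by
  by_cases h1 : t = "INFO"
  · subst h1; simp [PySem.Dict.contains, PySem.Dict.modify, PySem.Dict.insert, PySem.Dict.getD, PySem.Dict.get?]
  by_cases h2 : t = "WARN"
  · subst h2; simp [PySem.Dict.contains, PySem.Dict.modify, PySem.Dict.insert, PySem.Dict.getD, PySem.Dict.get?]
  by_cases h3 : t = "ERROR"
  · subst h3; simp [PySem.Dict.contains, PySem.Dict.modify, PySem.Dict.insert, PySem.Dict.getD, PySem.Dict.get?]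
  by_cases h4 : t = "BRUTEFORCE ATTEMPT"
  · subst h4; simp [PySem.Dict.contains, PySem.Dict.modify, PySem.Dict.insert, PySem.Dict.getD, PySem.Dict.get?]
  · simp [PySem.Dict.contains, h1, h2, h3, h4, Ne.symm h1, Ne.symm h2, Ne.symm h3, Ne.symm h4]

-- A's loop invariant: folding over ls from the 4-key dict adds the first-token counts to each value.
lemma securityA_fold (ls : List String) (a b c e : Int) :
    ls.foldl securityLoopBody (PySem.Dict.mk [("INFO", a), ("WARN", b), ("ERROR", c), ("BRUTEFORCE ATTEMPT", e)])
    = PySem.Dict.mk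
        [("INFO", a + ((ls.map (fun l => (PySem.Str.split₀ l).headD "")).count "INFO" : Int)),
         ("WARN", b + ((ls.map (fun l => (PySem.Str.split₀ l).headD "")).count "WARN" : Int)),
         ("ERROR", c + ((ls.map (fun l => (PySem.Str.split₀ l).headD "")).count "ERROR" : Int)),
         ("BRUTEFORCE ATTEMPT", e + ((ls.map (fun l => (PySem.Str.split₀ l).headD "")).count "BRUTEFORCE ATTEMPT" : Int))] := by
  induction ls generalizing a b c e with
  | nil => simp
  | cons l ls ih =>
    rcases hs : PySem.Str.split₀ l with _ | ⟨t, rest⟩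
    · have h1 : securityLoopBody (PySem.Dict.mk [("INFO", a), ("WARN", b), ("ERROR", c), ("BRUTEFORCE ATTEMPT", e)]) l
          = PySem.Dict.mk [("INFO", a), ("WARN", b), ("ERROR", c), ("BRUTEFORCE ATTEMPT", e)] := by
        simp [securityLoopBody, hs, PySem.List.pyGet?, PySem.List.pyIdx?]
      simp [List.foldl_cons, h1, ih, hs]
    · have h1 : securityLoopBody (PySem.Dict.mk [("INFO", a), ("WARN", b), ("ERROR", c), ("BRUTEFORCE ATTEMPT", e)]) l
          = PySem.Dict.mk [("INFO", a + if t = "INFO" then 1 else 0),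
                     ("WARN", b + if t = "WARN" then 1 else 0),
                     ("ERROR", c + if t = "ERROR" then 1 else 0),
                     ("BRUTEFORCE ATTEMPT", e + if t = "BRUTEFORCE ATTEMPT" then 1 else 0)] := by
        have hget : PySem.List.pyGet? (t :: rest) 0 = some t := by
          simp [PySem.List.pyGet?, PySem.List.pyIdx?]
        rw [securityLoopBody, hs, hget]
        exact securityA_step t a b c e
      rw [List.foldl_cons, h1, ih]
      simp only [List.map_cons, hs, List.headD_cons, List.count_cons, PySem.Dict.mk.injEq,
        List.cons.injEq, Prod.mk.injEq, and_true, true_and, beq_iff_eq]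
      refine ⟨?_, ?_, ?_, ?_⟩ <;> split_ifs with h <;> simp_all <;> ring

-- B's run-length scan over a ≤-sorted token list: for any key k, the flushed table's entry grows by
-- the count of k among the scanned tokens, provided no scanned token already has an entry and the
-- current run's token precedes every scanned token.
lemma securityB_fold (ts : List String) (d : PySem.Dict String Int) (cur : Option String) (run : Int)
    (hsorted : ts.Pairwise (· ≤ ·))
    (h1 : ∀ s ∈ ts, d.getD s 0 = 0)
    (h2 : ∀ c, cur = some c → ∀ s ∈ ts, c ≤ s)
    (k : String) :
    (securityFlushB (ts.foldl securityStepB (d, cur, run))).getD k 0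
      = (securityFlushB (d, cur, run)).getD k 0 + (ts.count k : Int) := by
  induction ts generalizing d cur run with
  | nil => simp
  | cons t rest ih =>
    rw [List.foldl_cons]
    by_cases hc : some t = cur
    · -- same run continues
      have hstep : securityStepB (d, cur, run) t = (d, cur, run + 1) := by
        simp [securityStepB, hc]
      rw [hstep, ih d cur (run + 1) hsorted.of_cons
            (fun s hs => h1 s (List.mem_cons_of_mem _ hs))
            (fun c hcc s hs => h2 c hcc s (List.mem_cons_of_mem _ hs))]
      subst hc
      simp only [securityFlushB, List.count_cons]
      simp only [PySem.Dict.getD_insert]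
      split_ifs with hk <;> simp_all <;> omega
    · -- run changes
      match cur with
      | some c =>
        have hstep : securityStepB (d, some c, run) t = (d.insert c run, some t, 1) := by
          simp [securityStepB, hc]
        have hct : c ≠ t := by
          intro h; exact hc (by rw [h])
        have hcle : c ≤ t := h2 c rfl t List.mem_cons_self
        have hrest1 : ∀ s ∈ rest, (d.insert c run).getD s 0 = 0 := by
          intro s hs
          have hts : t ≤ s := (List.pairwise_cons.mp hsorted).1 s hs
          have hcs : c ≠ s := by
            intro h; subst h
            exact hct (le_antisymm hcle hts)
          rw [PySem.Dict.getD_insert_of_ne _ _ _ (Ne.symm hcs)]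
          exact h1 s (List.mem_cons_of_mem _ hs)
        rw [hstep, ih (d.insert c run) (some t) 1 hsorted.of_cons hrest1
              (fun c' hcc s hs => by
                cases Option.some.injEq .. ▸ hcc with
                | refl => exact (List.pairwise_cons.mp hsorted).1 s hs)]
        have hd0 : d.getD t 0 = 0 := h1 t List.mem_cons_self
        clear ih hc h1 h2 hsorted hstep hrest1
        simp only [securityFlushB, List.count_cons, PySem.Dict.getD_insert]
        split_ifs with hk hkc <;> simp_all <;> omega
      | none =>
        have hstep : securityStepB (d, none, run) t = (d, some t, 1) := by
          simp [securityStepB]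
        rw [hstep, ih d (some t) 1 hsorted.of_cons
              (fun s hs => h1 s (List.mem_cons_of_mem _ hs))
              (fun c' hcc s hs => by
                cases Option.some.injEq .. ▸ hcc with
                | refl => exact (List.pairwise_cons.mp hsorted).1 s hs)]
        have hd0 : d.getD t 0 = 0 := h1 t List.mem_cons_self
        clear ih hc h1 h2 hsorted hstep
        simp only [securityFlushB, List.count_cons, PySem.Dict.getD_insert]
        split_ifs with hk <;> simp_all <;> omega

-- B's projected entry for any key is the count of that key among the first tokens.
lemma securityB_count (lines : List String) (k : String) :
    (securityFlushB
        ((PySem.List.sorted (lines.map (fun line => (PySem.Str.split₀ line).headD "")) (fun x => x) false).foldl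
          securityStepB (PySem.Dict.empty, none, 0))).getD k 0
      = ((lines.map (fun line => (PySem.Str.split₀ line).headD "")).count k : Int) := by
  set ts := PySem.List.sorted (lines.map (fun line => (PySem.Str.split₀ line).headD "")) (fun x => x) false with hts
  have hsorted : ts.Pairwise (· ≤ ·) := PySem.List.sorted_pairwise _ _
  have hcount : ts.count k = (lines.map (fun line => (PySem.Str.split₀ line).headD "")).count k :=
    (PySem.List.sorted_perm _ _ _).count_eq k
  rw [securityB_fold ts PySem.Dict.empty none 0 hsorted
        (fun s _ => by simp [PySem.Dict.getD_empty])
        (fun c hcc => by cases hcc), hcount]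
  simp [securityFlushB, PySem.Dict.getD_empty]

-- ===== VERDICT (by name: the statement is the Claim_ definition above) =====
theorem security_parse_spec : Claim_equal_security_parse := by
  intro lines _ _
  unfold Spec_security_parse security_parse security_parse_alt
  have hof : PySem.Dict.ofList ([("INFO", (0:Int)), ("WARN", 0), ("ERROR", 0), ("BRUTEFORCE ATTEMPT", 0)])
      = PySem.Dict.mk [("INFO", 0), ("WARN", 0), ("ERROR", 0), ("BRUTEFORCE ATTEMPT", 0)] := by decide
  rw [hof, securityA_fold]
  simp only [List.map_cons, List.map_nil, securityB_count]
  simp
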